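-- pv_equiv track=rewrite | github.com/akb89/pyfn | pyfn/marshalling/marshallers/bios.py | _get_token_index_3uples
-- ===== SOURCE A (Python) =====
-- def _get_token_index_3uples(text):
--     token_index_3uples = []
--     tokens = text.split()
--     start_index = 0
--     for token in tokens:
--         while token[0] != text[start_index]:
--             start_index += 1
--         token_index_3uples.append((token, start_index,
--                                    start_index+len(token)-1))
--         start_index += len(token)
--     return token_index_3uples
-- ===== SOURCE B (Python) =====
-- def _get_token_index_3uples(text):
--     token_index_3uples = []
--     i = 0
--     n = len(text)
--     while i < n:
--         if text[i].isspace():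
--             i += 1
--         else:
--             start = i
--             while i < n and not text[i].isspace():
--                 i += 1
--             token_index_3uples.append((text[start:i], start, i - 1))
--     return token_index_3uples
-- ===== Notes on version B (the rewrite author's own statement) =====
-- stated objective: alternative
-- what changed: B tokenizes in a single left-to-right character scan that records each token's span as it is found, instead of splitting first and then re-locating every token in the text with an inner search loop; it trades A's C-level str.split for an explicit one-pass scan of the same linear cost.
import Mathlib
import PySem

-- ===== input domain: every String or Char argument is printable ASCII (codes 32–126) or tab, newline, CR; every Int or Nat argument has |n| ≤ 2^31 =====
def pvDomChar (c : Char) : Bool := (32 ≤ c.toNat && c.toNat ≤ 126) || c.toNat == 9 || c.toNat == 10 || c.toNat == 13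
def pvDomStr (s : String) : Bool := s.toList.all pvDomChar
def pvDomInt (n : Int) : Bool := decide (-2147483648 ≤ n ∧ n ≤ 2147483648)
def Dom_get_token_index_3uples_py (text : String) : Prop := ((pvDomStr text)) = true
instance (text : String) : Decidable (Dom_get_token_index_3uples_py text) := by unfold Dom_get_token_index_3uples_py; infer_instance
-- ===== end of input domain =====

-- B replaces A's split-then-relocate tokenizer with a single-pass character scan that
-- records each token's span as it is found: an alternative decomposition of the same linear cost.

-- ===== PORT A =====
-- A: split the text into tokens, then relocate each token by scanning forward for its
-- first character (the Python while loop); the scan is transliterated as structural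
-- recursion on the remaining suffix of the text, carrying the index alongside.
-- 'none' marks the IndexError of text[start_index] (unreachable for tokens of split).
def pyFindA (c : Char) (suffix : List Char) (i : Int) : Option (Int × List Char) :=
  match suffix with
  | [] => none
  | x :: xs => if x = c then some (i, x :: xs) else pyFindA c xs (i + 1)

def pyALoop (tokens : List (List Char)) (suffix : List Char) (i : Int) :
    List (String × Int × Int) :=
  match tokens with
  | [] => []
  | tok :: ts =>
    match tok with
    | [] => []  -- token[0] would raise IndexError; split() never yields an empty token
    | c :: _ =>
      match pyFindA c suffix i with
      | none => []  -- text[start_index] IndexError; unreachable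
      | some (j, suf) =>
        (String.ofList tok, j, j + (tok.length : Int) - 1)
          :: pyALoop ts (suf.drop tok.length) (j + (tok.length : Int))

def get_token_index_3uples_py (text : String) : List (String × Int × Int) :=
  pyALoop (PySem.Chars.split₀ text.toList) text.toList 0

-- ===== PORT B =====
-- B: one left-to-right scan; skip a whitespace char, otherwise capture the maximal
-- run of non-whitespace chars (the inner while loop) together with its span.
def pyBScan (cs : List Char) (i : Int) : List (String × Int × Int) :=
  match cs with
  | [] => []
  | c :: rest =>
    if PySem.Chars.isspace c then pyBScan rest (i + 1)
    else
      let tok := c :: rest.takeWhile (fun d => !PySem.Chars.isspace d)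
      (String.ofList tok, i, i + (tok.length : Int) - 1)
        :: pyBScan (rest.dropWhile (fun d => !PySem.Chars.isspace d)) (i + (tok.length : Int))
termination_by cs.length
decreasing_by
  all_goals (have := List.length_dropWhile_le (fun d => !PySem.Chars.isspace d) rest; simp; try omega)

def get_token_index_3uples_py_alt (text : String) : List (String × Int × Int) :=
  pyBScan text.toList 0

-- ===== PRECONDITION & SPEC =====
def Spec_get_token_index_3uples_py (text : String) (out : List (String × Int × Int)) : Prop := out = get_token_index_3uples_py_alt text
instance (text : String) (out : List (String × Int × Int)) : Decidable (Spec_get_token_index_3uples_py text out) := by unfold Spec_get_token_index_3uples_py; infer_instance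

-- ===== CLAIM (what is proved, stated in full; the proofs are below) =====
def Claim_equal_get_token_index_3uples_py : Prop := ∀ (text : String), Dom_get_token_index_3uples_py text → Spec_get_token_index_3uples_py text (get_token_index_3uples_py text)

-- ===== LEMMAS AND PROOFS =====

-- reference tokenization: the words of a char list, split on isspace
def pvWords (cs : List Char) : List (List Char) :=
  match cs with
  | [] => []
  | c :: rest =>
    if PySem.Chars.isspace c then pvWords rest
    else (c :: rest.takeWhile (fun d => !PySem.Chars.isspace d))
          :: pvWords (rest.dropWhile (fun d => !PySem.Chars.isspace d))
termination_by cs.length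
decreasing_by
  all_goals (have := List.length_dropWhile_le (fun d => !PySem.Chars.isspace d) rest; simp; try omega)

-- split₀.go with its accumulators equals pvWords with the pending token / finished list prepended
theorem pvGo_spec (s : List Char) : ∀ (cur : List Char) (acc : List (List Char)),
    PySem.Chars.split₀.go s cur acc =
      acc.reverse ++ (if cur.isEmpty then pvWords s
        else (cur.reverse ++ s.takeWhile (fun d => !PySem.Chars.isspace d))
              :: pvWords (s.dropWhile (fun d => !PySem.Chars.isspace d))) := by
  induction s with
  | nil =>
    intro cur acc
    cases cur <;> simp [PySem.Chars.split₀.go, pvWords]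
  | cons c rest ih =>
    intro cur acc
    by_cases hs : PySem.Chars.isspace c
    · have hw : pvWords (c :: rest) = pvWords rest := by rw [pvWords, if_pos hs]
      cases cur with
      | nil =>
        rw [show PySem.Chars.split₀.go (c :: rest) [] acc
              = PySem.Chars.split₀.go rest [] acc by simp [PySem.Chars.split₀.go, hs],
            ih, hw]
        simp
      | cons a as =>
        rw [show PySem.Chars.split₀.go (c :: rest) (a :: as) acc
              = PySem.Chars.split₀.go rest [] ((a :: as).reverse :: acc) by
            simp [PySem.Chars.split₀.go, hs]]
        rw [ih]
        simp [hs, hw]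
    · rw [show PySem.Chars.split₀.go (c :: rest) cur acc
            = PySem.Chars.split₀.go rest (c :: cur) acc by
          simp [PySem.Chars.split₀.go, hs]]
      rw [ih]
      have hb : PySem.Chars.isspace c = false := by simpa using hs
      cases cur with
      | nil =>
        rw [pvWords, if_neg hs]
        simp
      | cons a as =>
        simp [hb]

theorem pvSplit_eq_words (cs : List Char) : PySem.Chars.split₀ cs = pvWords cs := by
  have := pvGo_spec cs [] []
  simpa [PySem.Chars.split₀] using this

-- every word starts with a non-space character
theorem pvWords_head (cs : List Char) :
    ∀ tok ∈ pvWords cs, ∃ c rest, tok = c :: rest ∧ PySem.Chars.isspace c = false := by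
  induction cs using pvWords.induct with
  | case1 => simp [pvWords]
  | case2 c rest hs ih =>
    rw [pvWords, if_pos hs]; exact ih
  | case3 c rest hs ih =>
    rw [pvWords, if_neg hs]
    intro tok htok
    rcases List.mem_cons.mp htok with rfl | h
    · exact ⟨c, _, rfl, by simpa using hs⟩
    · exact ih tok h

-- stepping A's relocation loop over one whitespace char is a no-op (no token head is whitespace)
theorem pvALoop_skip_ws (toks : List (List Char)) (c : Char) (rest : List Char) (i : Int)
    (hc : PySem.Chars.isspace c = true)
    (hh : ∀ tok ∈ toks, ∃ a r, tok = a :: r ∧ PySem.Chars.isspace a = false) :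
    pyALoop toks (c :: rest) i = pyALoop toks rest (i + 1) := by
  cases toks with
  | nil => simp [pyALoop]
  | cons tok ts =>
    obtain ⟨a, r, rfl, ha⟩ := hh tok (by simp)
    have hne : c ≠ a := by
      intro h; rw [h] at hc; rw [hc] at ha; cases ha
    simp [pyALoop, pyFindA, hne]

-- main invariant: A's loop over the words of s, searching in s from index i, is B's scan of s at i
theorem pvMain (cs : List Char) : ∀ (i : Int), pyALoop (pvWords cs) cs i = pyBScan cs i := by
  induction cs using pvWords.induct with
  | case1 => intro i; simp [pvWords, pyALoop, pyBScan]
  | case2 c rest hs ih =>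
    intro i
    rw [pvWords, if_pos hs, pyBScan, if_pos hs, ← ih,
        pvALoop_skip_ws _ c rest i hs (pvWords_head rest)]
  | case3 c rest hs ih =>
    intro i
    have hb : PySem.Chars.isspace c = false := by simpa using hs
    have hdrop : List.drop (c :: rest.takeWhile (fun d => !PySem.Chars.isspace d)).length (c :: rest)
        = rest.dropWhile (fun d => !PySem.Chars.isspace d) := by
      rw [List.length_cons, List.drop_succ_cons]
      calc List.drop (rest.takeWhile (fun d => !PySem.Chars.isspace d)).length rest
          = List.drop (rest.takeWhile (fun d => !PySem.Chars.isspace d)).length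
              (rest.takeWhile (fun d => !PySem.Chars.isspace d)
                ++ rest.dropWhile (fun d => !PySem.Chars.isspace d)) := by
            rw [List.takeWhile_append_dropWhile]
        _ = rest.dropWhile (fun d => !PySem.Chars.isspace d) := by rw [List.drop_left]
    rw [pvWords, if_neg hs, pyALoop]
    simp only [pyFindA, if_true]
    rw [hdrop, ih]
    rw [pyBScan, if_neg hs]

-- ===== VERDICT (by name: the statement is the Claim_ definition above) =====
theorem get_token_index_3uples_py_spec : Claim_equal_get_token_index_3uples_py := by
  intro text _
  unfold Spec_get_token_index_3uples_py get_token_index_3uples_py get_token_index_3uples_py_alt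
  rw [pvSplit_eq_words, pvMain]
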